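-- pv_equiv track=rewrite | github.com/helloitsjoe/aoc-2024 | aoc/day_05.py | _get_last_orders
-- ===== SOURCE A (Python) =====
-- def _get_last_orders(orders) -> list[int]:
--     # Example: [[34, 12], [34, 56], [56, 12]]
--     a_counts: dict[int, int] = {}
--     b_counts: dict[int, int] = {}
--     first = None
--     last = None
--     mid = None
--     for a, b in orders:
--         if a in a_counts:
--             first = a
--             a_counts[a] += 1
--         else:
--             a_counts[a] = 1
--         if b in b_counts:
--             last = b
--             b_counts[b] += 1
--         else:
--             b_counts[b] = 1
--
--     for a, b in orders:
--         if a_counts[a] == 1: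
--             mid = a
--
--     if first is None or mid is None or last is None:
--         raise RuntimeError("this should not happen")
--
--     return [first, mid, last]
-- ===== SOURCE B (Python) =====
-- def _get_last_orders(orders) -> list[int]:
--     a_list = [a for a, _ in orders]
--     b_list = [b for _, b in orders]
--     a_counts = {}
--     for a in a_list:
--         a_counts[a] = a_counts.get(a, 0) + 1
--     b_counts = {}
--     for b in b_list:
--         b_counts[b] = b_counts.get(b, 0) + 1
--     first = next((a for a in reversed(a_list) if a_counts[a] > 1), None)
--     last = next((b for b in reversed(b_list) if b_counts[b] > 1), None)
--     mid = next((a for a in reversed(a_list) if a_counts[a] == 1), None)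
--     if first is None or mid is None or last is None:
--         raise RuntimeError("this should not happen")
--     return [first, mid, last]
-- ===== Notes on version B (the rewrite author's own statement) =====
-- stated objective: simpler
-- what changed: A interleaves duplicate-tracking with counting in one stateful loop and rescans for mid; B counts once and extracts each of first/mid/last by a single reverse scan over the counted lists.
import Mathlib
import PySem

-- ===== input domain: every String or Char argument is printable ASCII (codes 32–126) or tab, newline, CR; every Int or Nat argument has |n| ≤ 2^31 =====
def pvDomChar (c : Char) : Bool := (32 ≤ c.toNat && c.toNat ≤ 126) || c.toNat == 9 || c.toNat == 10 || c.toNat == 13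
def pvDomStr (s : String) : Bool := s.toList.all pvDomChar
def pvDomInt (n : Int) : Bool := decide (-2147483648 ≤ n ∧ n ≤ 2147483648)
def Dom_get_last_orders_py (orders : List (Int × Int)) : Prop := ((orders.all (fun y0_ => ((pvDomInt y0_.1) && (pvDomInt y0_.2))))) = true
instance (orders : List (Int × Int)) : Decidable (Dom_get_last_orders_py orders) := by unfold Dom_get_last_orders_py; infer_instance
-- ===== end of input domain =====

-- B counts once and extracts first/mid/last by reverse scans, instead of A's interleaved
-- stateful tracking loop plus rescan; same O(n) cost, simpler decomposition.

-- ===== PORT A =====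
-- one loop step of A's first for-loop: update both counters, track duplicate a (-> first) and b (-> last)
def pvStepA (st : PySem.Dict Int Int × PySem.Dict Int Int × Option Int × Option Int)
    (p : Int × Int) : PySem.Dict Int Int × PySem.Dict Int Int × Option Int × Option Int :=
  let (ac, bc, first, last) := st
  let (a, b) := p
  let (ac, first) :=
    match ac.get? a with
    | some n => (ac.insert a (n + 1), some a)   -- a in a_counts: first = a; a_counts[a] += 1
    | none   => (ac.insert a 1, first)
  let (bc, last) :=
    match bc.get? b with
    | some n => (bc.insert b (n + 1), some b)
    | none   => (bc.insert b 1, last)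
  (ac, bc, first, last)

def get_last_orders_py (orders : List (Int × Int)) : List Int :=
  let s := orders.foldl pvStepA (PySem.Dict.empty, PySem.Dict.empty, none, none)
  let ac := s.1
  let first := s.2.2.1
  let last := s.2.2.2
  -- second loop: mid = last a with a_counts[a] == 1
  let mid := orders.foldl (fun m p => if ac.getD p.1 0 == 1 then some p.1 else m) none
  match first, mid, last with
  | some f, some m, some l => [f, m, l]
  | _, _, _ => []   -- Python raises RuntimeError here; excluded by Pre_

-- ===== PORT B =====
def get_last_orders_py_alt (orders : List (Int × Int)) : List Int :=
  let a_list := orders.map Prod.fst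
  let b_list := orders.map Prod.snd
  let a_counts := a_list.foldl (fun d a => d.insert a (d.getD a 0 + 1)) PySem.Dict.empty
  let b_counts := b_list.foldl (fun d b => d.insert b (d.getD b 0 + 1)) PySem.Dict.empty
  let first := a_list.reverse.find? (fun a => decide ((1 : Int) < a_counts.getD a 0))
  let last := b_list.reverse.find? (fun b => decide ((1 : Int) < b_counts.getD b 0))
  let mid := a_list.reverse.find? (fun a => a_counts.getD a 0 == 1)
  -- 'if first is None or mid is None or last is None: raise' — checked one by one; excluded by Pre_
  match first with
  | none => []
  | some f =>
    match mid with
    | none => []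
    | some m =>
      match last with
      | none => []
      | some l => [f, m, l]

-- ===== PRECONDITION & SPEC =====
-- exactly the inputs where the Python A returns (first, mid and last all get set); elsewhere A raises RuntimeError
def Pre_get_last_orders_py (orders : List (Int × Int)) : Prop :=
  (∃ p ∈ orders, 1 < (orders.map Prod.fst).count p.1) ∧
  (∃ p ∈ orders, (orders.map Prod.fst).count p.1 = 1) ∧
  (∃ p ∈ orders, 1 < (orders.map Prod.snd).count p.2)
instance (orders : List (Int × Int)) : Decidable (Pre_get_last_orders_py orders) := by
  unfold Pre_get_last_orders_py; infer_instance

def pvWitness_get_last_orders_py : (List (Int × Int)) := [(1, 2), (1, 2), (3, 4)]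

def Spec_get_last_orders_py (orders : List (Int × Int)) (out : List Int) : Prop := out = get_last_orders_py_alt orders
instance (orders : List (Int × Int)) (out : List Int) : Decidable (Spec_get_last_orders_py orders out) := by unfold Spec_get_last_orders_py; infer_instance

-- ===== CLAIM (what is proved, stated in full; the proofs are below) =====
def Claim_equal_get_last_orders_py : Prop := ∀ (orders : List (Int × Int)), Dom_get_last_orders_py orders → Pre_get_last_orders_py orders → Spec_get_last_orders_py orders (get_last_orders_py orders)

-- ===== LEMMAS AND PROOFS =====

lemma pv_counter_snoc (cs : List Int) (c : Int) :
    (PySem.Dict.counter cs).insert c ((PySem.Dict.counter cs).getD c 0 + 1)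
      = PySem.Dict.counter (cs ++ [c]) := by
  rw [PySem.Dict.counter_append_singleton]
  exact PySem.Dict.ext_iff.mpr rfl

-- last-match accumulator loop = find? on the reversed list (with initial value)
lemma pv_foldl_lastmatch (q : Int → Bool) (l : List Int) (init : Option Int) :
    l.foldl (fun m a => if q a then some a else m) init
      = match l.reverse.find? q with | some x => some x | none => init := by
  induction l generalizing init with
  | nil => simp
  | cons a t ih =>
    simp only [List.foldl_cons, ih, List.reverse_cons, List.find?_append]
    cases h : t.reverse.find? q with
    | some x => simp
    | none => cases hq : q a <;> simp [hq, List.find?]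

-- A's second loop, which scans pairs but looks only at the first components
lemma pv_foldl_lastmatch_fst (q : Int → Bool) (l : List (Int × Int)) (init : Option Int) :
    l.foldl (fun m p => if q p.1 then some p.1 else m) init
      = match (l.map Prod.fst).reverse.find? q with | some x => some x | none => init := by
  rw [← pv_foldl_lastmatch, List.foldl_map]

lemma pv_find?_congr (l : List Int) (p q : Int → Bool) (h : ∀ x ∈ l, p x = q x) :
    l.find? p = l.find? q := by
  induction l with
  | nil => rfl
  | cons a t ih =>
    simp only [List.find?]
    rw [h a (by simp)]
    cases q a
    · exact ih (fun x hx => h x (by simp [hx]))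
    · rfl

-- appending one element to the scanned list updates the duplicate-tracking result
lemma pv_find_snoc (cs : List Int) (c : Int) :
    (cs ++ [c]).reverse.find? (fun y => decide ((1 : Int) < ((cs ++ [c]).count y : Int)))
      = if c ∈ cs then some c
        else cs.reverse.find? (fun y => decide ((1 : Int) < (cs.count y : Int))) := by
  rw [List.reverse_append, List.reverse_singleton, List.singleton_append]
  by_cases hc : c ∈ cs
  · have h1 : 0 < cs.count c := List.count_pos_iff.mpr hc
    rw [List.find?_cons_of_pos (by simp [List.count_append]; omega), if_pos hc]
  · have h0 : cs.count c = 0 := List.count_eq_zero.mpr hc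
    rw [List.find?_cons_of_neg (by simp [List.count_append, h0]), if_neg hc]
    apply pv_find?_congr
    intro y hy
    have hy' : y ∈ cs := List.mem_reverse.mp hy
    have hne : y ≠ c := fun h => hc (h ▸ hy')
    have hz : List.count y [c] = 0 := by simp [Ne.symm hne]
    simp [List.count_append, hz]

-- the (dict, tracker) pair produced by one match of A's loop, in closed form
lemma pvStep_dict_pair (cs : List Int) (c : Int) (f : Option Int) :
    (match (PySem.Dict.counter cs).get? c with
      | some n => ((PySem.Dict.counter cs).insert c (n + 1), some c)
      | none   => ((PySem.Dict.counter cs).insert c 1, f))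
      = ((PySem.Dict.counter cs).insert c ((PySem.Dict.counter cs).getD c 0 + 1),
         if c ∈ cs then some c else f) := by
  cases h : (PySem.Dict.counter cs).get? c with
  | some n =>
    have hcont : cs.contains c = true := by
      rw [← PySem.Dict.contains_counter, PySem.Dict.contains_eq_isSome_get?, h]
      rfl
    have hc : c ∈ cs := by simpa using hcont
    rw [PySem.Dict.getD_of_get?_eq_some _ 0 h, if_pos hc]
  | none =>
    have hcont : cs.contains c = false := by
      rw [← PySem.Dict.contains_counter, PySem.Dict.contains_eq_isSome_get?, h]
      rfl
    have hc : c ∉ cs := by simpa using hcont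
    rw [PySem.Dict.getD_of_get?_eq_none _ 0 h, if_neg hc]
    norm_num

-- characterization of A's first loop: counters and the two duplicate trackers
lemma pvA_fold_char (l : List (Int × Int)) :
    l.foldl pvStepA (PySem.Dict.empty, PySem.Dict.empty, none, none)
      = (PySem.Dict.counter (l.map Prod.fst), PySem.Dict.counter (l.map Prod.snd),
         (l.map Prod.fst).reverse.find? (fun a => decide ((1 : Int) < ((l.map Prod.fst).count a : Int))),
         (l.map Prod.snd).reverse.find? (fun b => decide ((1 : Int) < ((l.map Prod.snd).count b : Int)))) := by
  induction l using List.reverseRecOn with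
  | nil => rfl
  | append_singleton l x ih =>
    obtain ⟨a, b⟩ := x
    rw [List.foldl_append, List.foldl_cons, List.foldl_nil, ih]
    simp only [List.map_append, List.map_cons, List.map_nil]
    rw [pv_find_snoc (l.map Prod.fst) a, pv_find_snoc (l.map Prod.snd) b]
    unfold pvStepA
    simp only
    rw [pvStep_dict_pair, pvStep_dict_pair]
    rw [pv_counter_snoc, pv_counter_snoc]

-- ===== VERDICT (by name: the statement is the Claim_ definition above) =====
theorem get_last_orders_py_spec : Claim_equal_get_last_orders_py := by
  intro orders _ _
  unfold Spec_get_last_orders_py get_last_orders_py get_last_orders_py_alt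
  rw [pvA_fold_char]
  simp only [PySem.Dict.foldl_insert_getD_add_one_eq_counter, PySem.Dict.getD_counter]
  rw [pv_foldl_lastmatch_fst (fun a => (((orders.map Prod.fst).count a : Int) == 1)) orders none]
  cases (orders.map Prod.fst).reverse.find?
      (fun a => decide ((1 : Int) < ((orders.map Prod.fst).count a : Int))) <;>
    cases (orders.map Prod.fst).reverse.find?
        (fun a => (((orders.map Prod.fst).count a : Int) == 1)) <;>
      cases (orders.map Prod.snd).reverse.find?
          (fun b => decide ((1 : Int) < ((orders.map Prod.snd).count b : Int))) <;>
        rfl
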